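-- pv_equiv track=rewrite | github.com/Fericiano-Fluorite/code_recommender | main.py | topKEvaluate
-- ===== SOURCE A (Python) =====
-- def topKEvaluate(ranking, review):
--     K = 10
--     correct = 0
--     total = 0
--
--     for auth in review["approve_history"]:
--         auth = auth["userId"]
--         total += 1
--         for i in range(K):
--             # if the weight is 0, then all following predictions are considered wrong by default
--             if ranking[i][0] == 0:
--                 break
--             name = ranking[i][1]
--             if name == auth:
--                 # if the actual related author is found in the top K position of the ordered ranking list
--                 # then the counter of all correctly predicted authors is accumulated by 1 based on the definition of the metric
--                 correct += 1
--                 break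
--
--     return correct, total
-- ===== SOURCE B (Python) =====
-- def topKEvaluate(ranking, review):
--     # Pass 1: tally approvers by userId (multiplicity matters).
--     counts = {}
--     total = 0
--     for auth in review["approve_history"]:
--         u = auth["userId"]
--         counts[u] = counts.get(u, 0) + 1
--         total += 1
--     # Pass 2: walk the ranking's top-10 prefix (stopping at the first zero
--     # weight) and collect each name's tally; pop so a name repeated in the
--     # prefix is credited only once, matching first-hit semantics.
--     correct = 0
--     for weight, name in ranking[:10]:
--         if weight == 0:
--             break
--         correct += counts.pop(name, 0)
--     return correct, total
-- ===== Notes on version B (the rewrite author's own statement) =====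
-- stated objective: alternative
-- what changed: B inverts the traversal: instead of rescanning the ranking's top 10 for every approver, it first tallies approvers into a counter dict keyed by userId and then makes one pass over the ranking's valid top-10 prefix, popping and summing each name's tally.
import Mathlib
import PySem

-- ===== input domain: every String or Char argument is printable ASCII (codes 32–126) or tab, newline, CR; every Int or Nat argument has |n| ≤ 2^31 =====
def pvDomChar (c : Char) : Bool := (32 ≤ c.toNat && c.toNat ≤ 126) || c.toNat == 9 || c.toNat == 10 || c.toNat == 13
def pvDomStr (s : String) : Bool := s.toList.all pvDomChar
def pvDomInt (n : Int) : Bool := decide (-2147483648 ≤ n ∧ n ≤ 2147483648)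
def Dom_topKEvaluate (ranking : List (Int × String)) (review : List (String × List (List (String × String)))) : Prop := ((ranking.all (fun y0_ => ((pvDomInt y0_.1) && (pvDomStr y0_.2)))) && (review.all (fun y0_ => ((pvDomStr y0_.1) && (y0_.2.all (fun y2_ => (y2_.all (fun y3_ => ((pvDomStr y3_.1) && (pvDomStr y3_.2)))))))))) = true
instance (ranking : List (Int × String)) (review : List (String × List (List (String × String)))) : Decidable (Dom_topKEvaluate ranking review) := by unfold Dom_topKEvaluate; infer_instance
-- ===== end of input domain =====

-- B inverts A's traversal: it tallies approvers into a counter dict once, then makes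
-- one pass over the ranking's valid top-10 prefix popping and summing each name's
-- tally, instead of rescanning the ranking's top 10 per approver (objective: alternative).

-- ===== PORT A =====
-- A's inner 'for i in range(K)' loop: scans the given index list; 'none' from pyGet? is
-- Python's IndexError (excluded by Pre_), where this total port stops with 0.
def pvA_scan (ranking : List (Int × String)) (auth : String) : List Int → Int
  | [] => 0
  | i :: rest =>
    match PySem.List.pyGet? ranking i with
    | none => 0
    | some p =>
      if p.1 == 0 then 0
      else if p.2 == auth then 1
      else pvA_scan ranking auth rest

def topKEvaluate (ranking : List (Int × String)) (review : List (String × List (List (String × String)))) : Int × Int :=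
  match List.lookup "approve_history" review with
  | none => (0, 0)  -- KeyError in Python; excluded by Pre_
  | some hist =>
    hist.foldl (fun (ct : Int × Int) auth =>
      match List.lookup "userId" auth with
      | none => ct  -- KeyError in Python; excluded by Pre_
      | some u => (ct.1 + pvA_scan ranking u (PySem.List.pyRange 0 10 1), ct.2 + 1)) (0, 0)

-- ===== PORT B =====
-- B's second loop: over ranking[:10], breaking at the first zero weight, popping the
-- name's tally ('counts.pop(name, 0)' = read getD, then erase) into the running sum.
def pvB_sum : List (Int × String) → PySem.Dict String Int → Int → Int
  | [], _, c => c
  | p :: rest, d, c => if p.1 == 0 then c else pvB_sum rest (d.erase p.2) (c + d.getD p.2 0)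

def topKEvaluate_alt (ranking : List (Int × String)) (review : List (String × List (List (String × String)))) : Int × Int :=
  match List.lookup "approve_history" review with
  | none => (0, 0)  -- KeyError in Python; excluded by Pre_
  | some hist =>
    -- B's first loop: counts[u] = counts.get(u, 0) + 1; total += 1
    let dt := hist.foldl (fun (s : PySem.Dict String Int × Int) auth =>
        match List.lookup "userId" auth with
        | none => s  -- KeyError in Python; excluded by Pre_
        | some u => (s.1.insert u (s.1.getD u 0 + 1), s.2 + 1)) (PySem.Dict.empty, 0)
    (pvB_sum (PySem.List.slice ranking none (some 10)) dt.1 0, dt.2)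

-- ===== PRECONDITION & SPEC =====
-- names of the ranking's top-10 entries before the first zero weight
def pvNames (ranking : List (Int × String)) : List String :=
  ((ranking.take 10).takeWhile (fun p => p.1 != 0)).map (·.2)

-- the inner loop for approver u terminates without IndexError
def pvSafe (ranking : List (Int × String)) (u : String) : Bool :=
  decide (10 ≤ ranking.length) || (ranking.take 10).any (fun p => p.1 == 0) || (pvNames ranking).contains u

-- Pre_ = exactly the inputs on which A returns: the "approve_history" key exists, every
-- approver has a "userId", and each approver's inner scan breaks or exhausts range(10)
-- before indexing past the end of a short ranking (otherwise Python raises).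
def Pre_topKEvaluate (ranking : List (Int × String)) (review : List (String × List (List (String × String)))) : Prop :=
  (match List.lookup "approve_history" review with
   | none => false
   | some hist => hist.all (fun a =>
       match List.lookup "userId" a with
       | none => false
       | some u => pvSafe ranking u)) = true
instance (ranking : List (Int × String)) (review : List (String × List (List (String × String)))) : Decidable (Pre_topKEvaluate ranking review) := by unfold Pre_topKEvaluate; infer_instance

def pvWitness_topKEvaluate : (List (Int × String)) × (List (String × List (List (String × String)))) :=
  ([(1, "a"), (0, "")], [("approve_history", [[("userId", "a")], [("userId", "b")]])])

def Spec_topKEvaluate (ranking : List (Int × String)) (review : List (String × List (List (String × String)))) (out : Int × Int) : Prop := out = topKEvaluate_alt ranking review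
instance (ranking : List (Int × String)) (review : List (String × List (List (String × String)))) (out : Int × Int) : Decidable (Spec_topKEvaluate ranking review out) := by unfold Spec_topKEvaluate; infer_instance

-- ===== CLAIM (what is proved, stated in full; the proofs are below) =====
def Claim_equal_topKEvaluate : Prop := ∀ (ranking : List (Int × String)) (review : List (String × List (List (String × String)))), Dom_topKEvaluate ranking review → Pre_topKEvaluate ranking review → Spec_topKEvaluate ranking review (topKEvaluate ranking review)

-- ===== LEMMAS AND PROOFS =====

-- the userId of one approve_history entry (Pre_ guarantees the lookup succeeds)
def pvUid (a : List (String × String)) : String := (List.lookup "userId" a).getD ""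

-- ---- A-side characterisation: first-hit scan of the first n entries ----
def pvHit (u : String) : Nat → List (Int × String) → Int
  | 0, _ => 0
  | _ + 1, [] => 0
  | n + 1, p :: rest => if p.1 == 0 then 0 else if p.2 == u then 1 else pvHit u n rest

theorem pvA_scan_eq_pvHit (u : String) (n : Nat) : ∀ (k : Nat) (l : List (Int × String)),
    pvA_scan l u (PySem.List.pyRange (k : Int) ((k : Int) + (n : Int)) 1) = pvHit u n (l.drop k) := by
  induction n with
  | zero =>
    intro k l
    have h0 : ((k : Int) + ((0 : Nat) : Int)) ≤ (k : Int) := by simp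
    rw [PySem.List.pyRange_one_eq_nil h0]
    simp [pvA_scan, pvHit]
  | succ n ih =>
    intro k l
    have h0 : (k : Int) < (k : Int) + ((n + 1 : Nat) : Int) := by push_cast; omega
    rw [PySem.List.pyRange_one_cons h0]
    rcases h : l[k]? with _ | p
    · have hd : l.drop k = [] := by
        simp only [List.getElem?_eq_none_iff] at h
        exact List.drop_eq_nil_of_le h
      simp [pvA_scan, PySem.List.pyGet?_natCast, h, hd, pvHit]
    · obtain ⟨hk, -⟩ := List.getElem?_eq_some_iff.mp h
      have hd : l.drop k = p :: l.drop (k + 1) := by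
        rw [List.drop_eq_getElem_cons hk]
        simp_all
      have hr : pvA_scan l u (PySem.List.pyRange ((k : Int) + 1) ((k : Int) + ((n + 1 : Nat) : Int)) 1)
          = pvHit u n (l.drop (k + 1)) := by
        have e1 : ((k : Int) + 1) = ((k + 1 : Nat) : Int) := by push_cast; ring
        have e2 : (k : Int) + ((n + 1 : Nat) : Int) = ((k + 1 : Nat) : Int) + (n : Int) := by push_cast; ring
        rw [e1, e2]
        exact ih (k + 1) l
      push_cast at hr
      simp [pvA_scan, PySem.List.pyGet?_natCast, h, hd, pvHit, hr]

theorem pvHit_eq_mem (u : String) : ∀ (n : Nat) (l : List (Int × String)),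
    (n ≤ l.length ∨ (l.take n).any (fun p => p.1 == 0) = true
      ∨ u ∈ ((l.take n).takeWhile (fun p => p.1 != 0)).map (·.2)) →
    pvHit u n l = if u ∈ ((l.take n).takeWhile (fun p => p.1 != 0)).map (·.2) then 1 else 0 := by
  intro n
  induction n with
  | zero => intro l _; simp [pvHit]
  | succ n ih =>
    intro l h
    match l with
    | [] => simp at h
    | p :: rest =>
      simp only [List.take_succ_cons, List.takeWhile_cons, List.any_cons, List.length_cons] at h ⊢
      by_cases hz : p.1 = 0
      · simp [pvHit, hz]
      · have hz' : (p.1 == 0) = false := by simp [hz]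
        have hz2 : (p.1 != 0) = true := by simp [hz]
        simp only [hz', hz2, Bool.false_or, if_true, List.map_cons, List.mem_cons] at h ⊢
        by_cases hm : p.2 = u
        · simp [pvHit, hz, hm]
        · have hm' : (p.2 == u) = false := by simp [hm]
          have h' : n ≤ rest.length ∨ (rest.take n).any (fun p => p.1 == 0) = true
              ∨ u ∈ ((rest.take n).takeWhile (fun p => p.1 != 0)).map (·.2) := by
            rcases h with h | h | h
            · left; omega
            · right; left; exact h
            · rcases h with h | h
              · exact absurd h.symm hm
              · right; right; exact h
          simp only [pvHit, hz', hm', Bool.false_eq_true, if_false]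
          rw [ih rest h']
          simp only [or_iff_right (fun he => hm (Eq.symm he))]

-- one approver's contribution in A is a membership indicator over pvNames
theorem pvStep_eq (ranking : List (Int × String)) (u : String) (h : pvSafe ranking u = true) :
    pvA_scan ranking u (PySem.List.pyRange 0 10 1)
      = if (pvNames ranking).contains u then 1 else 0 := by
  have h1 : pvA_scan ranking u (PySem.List.pyRange 0 10 1) = pvHit u 10 ranking := by
    have := pvA_scan_eq_pvHit u 10 0 ranking
    norm_num at this
    exact this
  have hsafe : 10 ≤ ranking.length ∨ (ranking.take 10).any (fun p => p.1 == 0) = true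
      ∨ u ∈ ((ranking.take 10).takeWhile (fun p => p.1 != 0)).map (·.2) := by
    simp only [pvSafe, Bool.or_eq_true, decide_eq_true_eq, pvNames, List.contains_iff_mem] at h
    tauto
  rw [h1, pvHit_eq_mem u 10 ranking hsafe]
  by_cases hm : u ∈ ((ranking.take 10).takeWhile (fun p => p.1 != 0)).map (·.2)
  · simp [pvNames, hm]
  · simp [pvNames, hm]

-- A's loop over the history counts the approvers whose userId is a valid top-10 name
theorem pvAFold_eq (ranking : List (Int × String)) :
    ∀ (hist : List (List (String × String))) (c t : Int),
    (hist.all (fun a =>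
       match List.lookup "userId" a with
       | none => false
       | some u => pvSafe ranking u)) = true →
    hist.foldl (fun (ct : Int × Int) auth =>
      match List.lookup "userId" auth with
      | none => ct
      | some u => (ct.1 + pvA_scan ranking u (PySem.List.pyRange 0 10 1), ct.2 + 1)) (c, t)
    = (c + ((hist.map pvUid).countP (fun u => (pvNames ranking).contains u) : Int), t + (hist.length : Int)) := by
  intro hist
  induction hist with
  | nil => intro c t _; simp
  | cons a rest ih =>
    intro c t h
    simp only [List.all_cons, Bool.and_eq_true] at h
    obtain ⟨ha, hrest⟩ := h
    rcases hu : List.lookup "userId" a with _ | u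
    · rw [hu] at ha; simp at ha
    · rw [hu] at ha
      simp only [List.foldl_cons, hu, List.length_cons, List.map_cons, List.countP_cons]
      rw [pvStep_eq ranking u ha, ih _ _ hrest]
      have huid : pvUid a = u := by simp [pvUid, hu]
      rw [huid]
      by_cases hc : (pvNames ranking).contains u = true
      · simp only [hc, if_true]
        refine Prod.ext ?_ ?_ <;> · push_cast; ring
      · simp only [Bool.not_eq_true] at hc
        simp only [hc, Bool.false_eq_true, if_false]
        refine Prod.ext ?_ ?_ <;> · push_cast; ring

-- ---- B-side: dict facts not in the prelude's lemma list ----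
theorem pvFindFilterNe (k v : String) (h : v ≠ k) : ∀ (items : List (String × Int)),
    List.find? (fun p => p.1 == v) (items.filter (fun p => !(p.1 == k))) = List.find? (fun p => p.1 == v) items := by
  intro items
  induction items with
  | nil => rfl
  | cons p rest ih =>
    by_cases hk : p.1 = k
    · have hkv : (k == v) = false := by simp [Ne.symm h]
      simp [hk, hkv, ih]
    · by_cases hpv : p.1 = v
      · simp [h, hpv]
      · simp [hk, hpv, ih]

theorem pvGetD_erase (d : PySem.Dict String Int) (k v : String) :
    (d.erase k).getD v 0 = if v = k then 0 else d.getD v 0 := by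
  rcases d with ⟨items⟩
  by_cases hv : v = k
  · subst hv
    have h0 : List.find? (fun _ : String × Int => false) items = none :=
      List.find?_eq_none.mpr (by simp)
    simp [PySem.Dict.erase, PySem.Dict.getD, PySem.Dict.get?, h0]
  · simp [PySem.Dict.erase, PySem.Dict.getD, PySem.Dict.get?, hv, pvFindFilterNe k v hv]

theorem pvCountFilterNe (x v : String) : ∀ (us : List String),
    (us.filter (fun u => u != x)).count v = if v = x then 0 else us.count v := by
  intro us
  induction us with
  | nil => simp
  | cons u rest ih =>
    by_cases hx : u = x
    · simp only [List.filter_cons, hx, bne_self_eq_false, Bool.false_eq_true, if_false, ih]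
      split_ifs with h
      · rfl
      · simp only [List.count_cons]
        have hxv : (x == v) = false := by
          simp only [beq_eq_false_iff_ne, ne_eq]
          exact fun e => h e.symm
        simp [hxv]
    · by_cases hv : u = v
      · have hvx : ¬ v = x := fun e => hx (hv ▸ e)
        simp [List.filter_cons, hx, hv, List.count_cons, ih, hvx]
      · simp [List.filter_cons, hx, List.count_cons, hv, ih]

theorem pvCountSplit (x : String) (q : String → Bool) : ∀ (us : List String),
    us.countP (fun u => u == x || q u) = us.count x + (us.filter (fun u => u != x)).countP q := by
  intro us
  induction us with
  | nil => simp
  | cons u rest ih =>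
    by_cases hx : u = x
    · simp [List.countP_cons, hx, ih]; omega
    · simp [List.countP_cons, hx, List.count_cons, ih]
      by_cases hq : q u
      · simp [hq]
        omega
      · simp [hq]

-- B's second loop, with the dict holding the approvers' multiplicities, sums exactly
-- the number of approvers whose userId occurs in the valid prefix of l
theorem pvB_sum_spec : ∀ (l : List (Int × String)) (us : List String) (d : PySem.Dict String Int) (c : Int),
    (∀ v, d.getD v 0 = (us.count v : Int)) →
    pvB_sum l d c = c + (us.countP (fun u => ((l.takeWhile (fun p => p.1 != 0)).map (·.2)).contains u) : Int) := by
  intro l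
  induction l with
  | nil => intro us d c _; simp [pvB_sum]
  | cons p rest ih =>
    intro us d c hd
    by_cases hz : p.1 = 0
    · simp [pvB_sum, hz]
    · have hz' : (p.1 == 0) = false := by simp [hz]
      have hz2 : (p.1 != 0) = true := by simp [hz]
      have hd' : ∀ v, (d.erase p.2).getD v 0 = ((us.filter (fun u => u != p.2)).count v : Int) := by
        intro v
        rw [pvGetD_erase, pvCountFilterNe]
        split_ifs <;> simp [hd v]
      rw [show pvB_sum (p :: rest) d c = pvB_sum rest (d.erase p.2) (c + d.getD p.2 0) by
            simp [pvB_sum, hz'],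
          ih _ _ _ hd']
      simp only [List.takeWhile_cons, hz2, if_true, List.map_cons]
      have hcont : ∀ u : String, ((p.2 :: (rest.takeWhile (fun p => p.1 != 0)).map (·.2)).contains u)
          = (u == p.2 || ((rest.takeWhile (fun p => p.1 != 0)).map (·.2)).contains u) := by
        intro u; exact List.contains_cons
      simp only [hcont]
      rw [pvCountSplit, hd p.2]
      push_cast
      ring

-- B's first loop tallies the history into the counter dict and the length
theorem pvBFold_eq : ∀ (hist : List (List (String × String))) (ranking : List (Int × String))
    (d : PySem.Dict String Int) (t : Int),
    (hist.all (fun a =>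
       match List.lookup "userId" a with
       | none => false
       | some u => pvSafe ranking u)) = true →
    hist.foldl (fun (s : PySem.Dict String Int × Int) auth =>
        match List.lookup "userId" auth with
        | none => s
        | some u => (s.1.insert u (s.1.getD u 0 + 1), s.2 + 1)) (d, t)
    = ((hist.map pvUid).foldl (fun d u => d.insert u (d.getD u 0 + 1)) d, t + (hist.length : Int)) := by
  intro hist
  induction hist with
  | nil => intro ranking d t _; simp
  | cons a rest ih =>
    intro ranking d t h
    simp only [List.all_cons, Bool.and_eq_true] at h
    obtain ⟨ha, hrest⟩ := h
    rcases hu : List.lookup "userId" a with _ | u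
    · rw [hu] at ha; simp at ha
    · simp only [List.foldl_cons, hu, List.map_cons, List.length_cons]
      rw [ih ranking _ _ hrest]
      have huid : pvUid a = u := by simp [pvUid, hu]
      rw [huid]
      refine Prod.ext rfl ?_
      push_cast
      ring

-- ===== VERDICT (by name: the statement is the Claim_ definition above) =====
theorem topKEvaluate_spec : Claim_equal_topKEvaluate := by
  intro ranking review _ hpre
  unfold Spec_topKEvaluate topKEvaluate topKEvaluate_alt
  unfold Pre_topKEvaluate at hpre
  rcases hh : List.lookup "approve_history" review with _ | hist
  · rfl
  · rw [hh] at hpre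
    dsimp only at hpre ⊢
    rw [pvAFold_eq ranking hist 0 0 hpre, pvBFold_eq hist ranking PySem.Dict.empty 0 hpre]
    have hslice : PySem.List.slice ranking none (some 10) = ranking.take 10 := by
      have := PySem.List.slice_to (xs := ranking) (b := 10) (by norm_num)
      norm_num at this
      exact this
    have hcnt : ∀ v, ((hist.map pvUid).foldl (fun d u => d.insert u (d.getD u 0 + 1)) PySem.Dict.empty).getD v 0
        = (((hist.map pvUid).count v : Nat) : Int) := by
      intro v
      rw [PySem.Dict.getD_foldl_insert_add_one]
      simp
    rw [pvB_sum_spec (PySem.List.slice ranking none (some 10)) (hist.map pvUid) _ 0 hcnt]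
    rw [hslice]
    refine Prod.ext ?_ (by simp)
    simp [pvNames]
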